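-- pv_equiv track=rewrite | github.com/allen-proxmire/event-density | ED Simulation/analyze_overlap_cascade.py | triad_annotations
-- ===== SOURCE A (Python) =====
-- def pairwise_targets(modes: list) -> dict:
--     """All unordered-pair triad targets: {(m,n): sorted([m+n, |m-n|])}."""
--     targets = {}
--     for i, m in enumerate(modes):
--         for j, n in enumerate(modes):
--             if j <= i:
--                 continue
--             targets[(m, n)] = sorted({m + n, abs(m - n)})
--     return targets
--
-- def triad_annotations(seeded: list, child_set: set) -> list:
--     """Build human-readable triad-relation strings for child modes.
--
--     Returns list of (target_mode, annotation_string) tuples.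
--     """
--     tmap = pairwise_targets(seeded)
--     annots = []
--     seen = set()
--     for (m, n), tlist in sorted(tmap.items()):
--         for tgt in tlist:
--             if tgt in child_set and tgt not in seen:
--                 if tgt == m + n:
--                     annots.append((tgt, rf"${m}+{n}\to{tgt}$"))
--                 elif tgt == abs(m - n):
--                     annots.append((tgt, rf"$|{m}-{n}|\to{tgt}$"))
--                 seen.add(tgt)
--     return sorted(annots, key=lambda x: x[0])
-- ===== SOURCE B (Python) =====
-- def triad_annotations(seeded: list, child_set: set) -> list:
--     """Build human-readable triad-relation strings for child modes.
--
--     Returns list of (target_mode, annotation_string) tuples.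
--     """
--     pairs = sorted((seeded[i], seeded[j])
--                    for i in range(len(seeded))
--                    for j in range(i + 1, len(seeded)))
--     out = []
--     for tgt in sorted(child_set):
--         for m, n in pairs:
--             if tgt == m + n:
--                 out.append((tgt, rf"${m}+{n}\to{tgt}$"))
--                 break
--             if tgt == abs(m - n):
--                 out.append((tgt, rf"$|{m}-{n}|\to{tgt}$"))
--                 break
--     return out
-- ===== Notes on version B (the rewrite author's own statement) =====
-- stated objective: simpler
-- what changed: B drops A's pair-keyed dict of target lists and the seen-set dedup pass: it sorts the raw (m,n) pairs once and, for each child target in ascending order, scans that list for the first producing pair (sum checked before |difference|), emitting the annotation string directly.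
import Mathlib
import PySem

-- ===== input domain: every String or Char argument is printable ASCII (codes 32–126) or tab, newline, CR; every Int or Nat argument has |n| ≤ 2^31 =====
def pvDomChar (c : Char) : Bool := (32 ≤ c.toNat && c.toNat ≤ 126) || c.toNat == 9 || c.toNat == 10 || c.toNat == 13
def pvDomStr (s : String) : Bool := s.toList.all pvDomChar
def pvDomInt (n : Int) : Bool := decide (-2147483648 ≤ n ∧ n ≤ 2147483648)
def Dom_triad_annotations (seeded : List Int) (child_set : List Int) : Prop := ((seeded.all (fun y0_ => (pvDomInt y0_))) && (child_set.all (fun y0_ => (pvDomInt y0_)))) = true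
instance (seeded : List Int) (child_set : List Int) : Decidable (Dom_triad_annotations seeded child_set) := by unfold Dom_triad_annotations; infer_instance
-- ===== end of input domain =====

-- B replaces A's pair-keyed dict + seen-set dedup pass by a per-target first-match scan over
-- the sorted pair list (a simpler decomposition, same exact output).

-- ===== PORT A =====
-- shared LaTeX formatting of the two f-strings (identical in both Pythons)
def annotSum (m n tgt : Int) : String :=
  "$" ++ PySem.Int.toStr m ++ "+" ++ PySem.Int.toStr n ++ "\\to" ++ PySem.Int.toStr tgt ++ "$"
def annotDiff (m n tgt : Int) : String :=
  "$|" ++ PySem.Int.toStr m ++ "-" ++ PySem.Int.toStr n ++ "|\\to" ++ PySem.Int.toStr tgt ++ "$"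

def pairwise_targets (modes : List Int) : PySem.Dict (Int × Int) (List Int) :=
  (PySem.List.enumerate modes).foldl (fun targets im =>
    (PySem.List.enumerate modes).foldl (fun targets jn =>
      if jn.1 ≤ im.1 then targets
      else targets.insert (im.2, jn.2)
        (PySem.List.sorted (PySem.Set.ofList [im.2 + jn.2, |im.2 - jn.2|]) (fun t => t) false))
      targets) PySem.Dict.empty

-- sorted(tmap.items()): the dict keys are distinct, so Python's tuple comparison is decided by
-- the (m, n) key alone — ported as a lexicographic sort on the key (exact here).
def triad_annotations (seeded : List Int) (child_set : List Int) : List (Int × String) :=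
  let tmap := pairwise_targets seeded
  let st := (PySem.List.sorted tmap.items (fun it => (toLex (it.1.1, it.1.2) : Lex (Int × Int))) false).foldl
    (fun (st : List (Int × String) × PySem.Set Int) it =>
      it.2.foldl (fun st tgt =>
        if PySem.Set.contains child_set tgt && !(PySem.Set.contains st.2 tgt) then
          if tgt = it.1.1 + it.1.2 then
            (st.1 ++ [(tgt, annotSum it.1.1 it.1.2 tgt)], PySem.Set.add st.2 tgt)
          else if tgt = |it.1.1 - it.1.2| then
            (st.1 ++ [(tgt, annotDiff it.1.1 it.1.2 tgt)], PySem.Set.add st.2 tgt)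
          else (st.1, PySem.Set.add st.2 tgt)
        else st) st)
    (([] : List (Int × String)), (PySem.Set.empty : PySem.Set Int))
  PySem.List.sorted st.1 (fun x => x.1) false

-- ===== PORT B =====
-- the inner for-loop with break, as a structural recursion over the pair list
def firstAnnot (tgt : Int) : List (Int × Int) → Option String
  | [] => none
  | (m, n) :: rest =>
    if tgt = m + n then some (annotSum m n tgt)
    else if tgt = |m - n| then some (annotDiff m n tgt)
    else firstAnnot tgt rest

def triad_annotations_alt (seeded : List Int) (child_set : List Int) : List (Int × String) :=
  let pairs := PySem.List.sorted
    ((PySem.List.enumerate seeded).flatMap (fun im =>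
      (PySem.List.slice seeded (some (im.1 + 1)) none).map (fun x => (im.2, x))))
    (fun p => (toLex p : Lex (Int × Int))) false
  (PySem.List.sorted child_set (fun t => t) false).foldl
    (fun out tgt =>
      match firstAnnot tgt pairs with
      | some s => out ++ [(tgt, s)]
      | none => out) []

-- ===== PRECONDITION & SPEC =====
-- child_set is a Python set: its List port holds distinct elements. Pre_ states exactly that
-- set invariant; it excludes no input that represents a Python value of the declared type.
def Pre_triad_annotations (seeded : List Int) (child_set : List Int) : Prop := child_set.Nodup
instance (seeded : List Int) (child_set : List Int) : Decidable (Pre_triad_annotations seeded child_set) := by unfold Pre_triad_annotations; infer_instance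
def pvWitness_triad_annotations : List Int × List Int := ([3, 1, -2, 5], [4, 2, 8])
def Spec_triad_annotations (seeded : List Int) (child_set : List Int) (out : List (Int × String)) : Prop := out = triad_annotations_alt seeded child_set
instance (seeded : List Int) (child_set : List Int) (out : List (Int × String)) : Decidable (Spec_triad_annotations seeded child_set out) := by unfold Spec_triad_annotations; infer_instance

-- ===== CLAIM (what is proved, stated in full; the proofs are below) =====
def Claim_equal_triad_annotations : Prop := ∀ (seeded : List Int) (child_set : List Int), Dom_triad_annotations seeded child_set → Pre_triad_annotations seeded child_set → Spec_triad_annotations seeded child_set (triad_annotations seeded child_set)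

-- ===== LEMMAS AND PROOFS =====

-- the value A's dict stores for key p
def tval (p : Int × Int) : List Int :=
  PySem.List.sorted (PySem.Set.ofList [p.1 + p.2, |p.1 - p.2|]) (fun t => t) false

-- B's raw pair list (index order), before sorting
def raw (xs : List Int) : List (Int × Int) :=
  (PySem.List.enumerate xs).flatMap (fun im =>
    (PySem.List.slice xs (some (im.1 + 1)) none).map (fun x => (im.2, x)))

def lexKey (p : Int × Int) : Lex (Int × Int) := toLex p

def predB (t : Int) (p : Int × Int) : Bool := decide (t = p.1 + p.2) || decide (t = |p.1 - p.2|)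

-- A's per-target loop body
def tgtStep (child : List Int) (q : Int × Int)
    (st : List (Int × String) × PySem.Set Int) (tgt : Int) : List (Int × String) × PySem.Set Int :=
  if PySem.Set.contains child tgt && !(PySem.Set.contains st.2 tgt) then
    if tgt = q.1 + q.2 then (st.1 ++ [(tgt, annotSum q.1 q.2 tgt)], PySem.Set.add st.2 tgt)
    else if tgt = |q.1 - q.2| then (st.1 ++ [(tgt, annotDiff q.1 q.2 tgt)], PySem.Set.add st.2 tgt)
    else (st.1, PySem.Set.add st.2 tgt)
  else st

-- A's per-item loop body
def AStep (child : List Int) (st : List (Int × String) × PySem.Set Int)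
    (it : (Int × Int) × List Int) : List (Int × String) × PySem.Set Int :=
  it.2.foldl (tgtStep child it.1) st

-- A's main loop, run over a plain list of pairs
def runA (child : List Int) (Q : List (Int × Int)) : List (Int × String) × PySem.Set Int :=
  (Q.map (fun p => (p, tval p))).foldl (AStep child) ([], PySem.Set.empty)

lemma firstAnnot_append (t : Int) (L1 L2 : List (Int × Int)) :
    firstAnnot t (L1 ++ L2) = (firstAnnot t L1).or (firstAnnot t L2) := by
  induction L1 with
  | nil => simp [firstAnnot]
  | cons p L ih =>
    obtain ⟨m, n⟩ := p
    simp only [List.cons_append, firstAnnot]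
    split_ifs <;> simp [ih]

lemma firstAnnot_eq_find? (t : Int) (L : List (Int × Int)) :
    firstAnnot t L = (L.find? (predB t)).map
      (fun p => if t = p.1 + p.2 then annotSum p.1 p.2 t else annotDiff p.1 p.2 t) := by
  induction L with
  | nil => simp [firstAnnot]
  | cons p L ih =>
    obtain ⟨m, n⟩ := p
    simp only [firstAnnot, List.find?_cons, predB]
    split_ifs with h1 h2 <;> simp_all [predB]

lemma find?_min_of_sorted (L : List (Int × Int)) (pred : Int × Int → Bool)
    (hL : L.Pairwise (fun a b => lexKey a ≤ lexKey b)) (p : Int × Int)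
    (hp : L.find? pred = some p) :
    p ∈ L ∧ pred p = true ∧ ∀ q ∈ L, pred q = true → lexKey p ≤ lexKey q := by
  rw [List.find?_eq_some_iff_append] at hp
  obtain ⟨hpred, as, bs, rfl, has⟩ := hp
  refine ⟨by simp, hpred, ?_⟩
  intro q hq hqp
  rcases List.mem_append.1 hq with h | h
  · exact absurd hqp (by simpa using has q h)
  · rcases List.mem_cons.1 h with rfl | h
    · exact le_refl _
    · exact (List.pairwise_cons.1 (List.pairwise_append.1 hL).2.1).1 q h

lemma find?_eq_of_sorted (L1 L2 : List (Int × Int)) (pred : Int × Int → Bool)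
    (hmem : ∀ p, p ∈ L1 ↔ p ∈ L2)
    (h1 : L1.Pairwise (fun a b => lexKey a ≤ lexKey b))
    (h2 : L2.Pairwise (fun a b => lexKey a ≤ lexKey b)) :
    L1.find? pred = L2.find? pred := by
  cases e1 : L1.find? pred with
  | none =>
    cases e2 : L2.find? pred with
    | none => rfl
    | some p =>
      have m2 := find?_min_of_sorted L2 pred h2 p e2
      exact absurd m2.2.1 (List.find?_eq_none.1 e1 p ((hmem p).2 m2.1))
  | some p =>
    have m1 := find?_min_of_sorted L1 pred h1 p e1
    cases e2 : L2.find? pred with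
    | none => exact absurd m1.2.1 (List.find?_eq_none.1 e2 p ((hmem p).1 m1.1))
    | some q =>
      have m2 := find?_min_of_sorted L2 pred h2 q e2
      have hpq : lexKey p ≤ lexKey q := m1.2.2 q ((hmem q).2 m2.1) m2.2.1
      have hqp : lexKey q ≤ lexKey p := m2.2.2 p ((hmem p).1 m1.1) m1.2.1
      have heq : p = q := toLex.injective (le_antisymm hpq hqp)
      rw [heq]

lemma sorted2elem (a b : Int) :
    PySem.List.sorted (PySem.Set.ofList [a, b]) (fun t => t) false =
      if b = a then [a] else if b < a then [b, a] else [a, b] := by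
  by_cases h1 : b = a
  · subst h1
    simp [PySem.Set.ofList, PySem.Set.empty, PySem.Set.add, PySem.Set.contains,
      PySem.List.sorted, PySem.List.insertBy]
  · by_cases h2 : b < a <;>
      simp [PySem.Set.ofList, PySem.Set.empty, PySem.Set.add, PySem.Set.contains,
        PySem.List.sorted, PySem.List.insertBy, h1, h2]

lemma tval_cases (p : Int × Int) :
    tval p = if |p.1 - p.2| = p.1 + p.2 then [p.1 + p.2]
      else if |p.1 - p.2| < p.1 + p.2 then [|p.1 - p.2|, p.1 + p.2]
      else [p.1 + p.2, |p.1 - p.2|] := by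
  unfold tval
  exact sorted2elem (p.1 + p.2) |p.1 - p.2|

lemma contains_add_eq (S : PySem.Set Int) (x y : Int) :
    PySem.Set.contains (S.add x) y = (PySem.Set.contains S y || decide (y = x)) := by
  by_cases h : y ∈ S.add x
  · rw [(PySem.Set.contains_iff _ _).2 h]
    rcases (PySem.Set.mem_add S x y).1 h with h' | h'
    · rw [(PySem.Set.contains_iff _ _).2 h']; rfl
    · simp [h']
  · have h1 : PySem.Set.contains (S.add x) y = false := by
      rw [Bool.eq_false_iff]; intro hb; exact h ((PySem.Set.contains_iff _ _).1 hb)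
    have h2 : ¬ (y ∈ S ∨ y = x) := fun hh => h ((PySem.Set.mem_add S x y).2 hh)
    push_neg at h2
    have h3 : PySem.Set.contains S y = false := by
      rw [Bool.eq_false_iff]; intro hb; exact h2.1 ((PySem.Set.contains_iff _ _).1 hb)
    simp [h1, h3, h2.2]

lemma tgtStep_mem (child : List Int) (q : Int × Int) (st : List (Int × String) × PySem.Set Int)
    (a t : Int) (s : String) :
    ((t, s) ∈ (tgtStep child q st a).1) ↔ ((t, s) ∈ st.1 ∨
      (t = a ∧ PySem.Set.contains child a = true ∧ PySem.Set.contains st.2 a = false ∧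
        ((a = q.1 + q.2 ∧ s = annotSum q.1 q.2 a) ∨
         (¬ a = q.1 + q.2 ∧ a = |q.1 - q.2| ∧ s = annotDiff q.1 q.2 a)))) := by
  unfold tgtStep
  cases hc : PySem.Set.contains child a <;> cases hs : PySem.Set.contains st.2 a <;>
    simp only [hc, hs, Bool.not_false, Bool.not_true, Bool.and_true, Bool.and_false,
      Bool.true_and, Bool.false_and, if_true, if_false] <;>
    split_ifs with h1 h2 <;>
    simp_all [List.mem_append, Prod.mk.injEq] <;> tauto

lemma tgtStep_contains (child : List Int) (q : Int × Int)
    (st : List (Int × String) × PySem.Set Int) (a t : Int) :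
    PySem.Set.contains (tgtStep child q st a).2 t =
      (PySem.Set.contains st.2 t || (decide (t = a) && PySem.Set.contains child a)) := by
  unfold tgtStep
  cases hc : PySem.Set.contains child a <;> cases hs : PySem.Set.contains st.2 a <;>
    simp only [hc, hs, Bool.not_false, Bool.not_true, Bool.and_true, Bool.and_false,
      Bool.true_and, Bool.false_and, if_true, if_false] <;>
    split_ifs with h1 h2 <;>
    (try rw [contains_add_eq]) <;>
    by_cases ht : t = a <;> simp_all

lemma tgtStep_fst_cases (child : List Int) (q : Int × Int)
    (st : List (Int × String) × PySem.Set Int) (a : Int) :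
    (tgtStep child q st a).1 = st.1 ∨
      (∃ s, (tgtStep child q st a).1 = st.1 ++ [(a, s)] ∧
        PySem.Set.contains st.2 a = false ∧ PySem.Set.contains child a = true) := by
  unfold tgtStep
  cases hc : PySem.Set.contains child a <;> cases hs : PySem.Set.contains st.2 a <;>
    simp only [hc, hs, Bool.not_false, Bool.not_true, Bool.and_true, Bool.and_false,
      Bool.true_and, Bool.false_and, if_true, if_false]
  · exact Or.inl rfl
  · exact Or.inl rfl
  · split_ifs with h1 h2
    · exact Or.inr ⟨_, rfl, by simp [hs], by simp [hc]⟩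
    · exact Or.inr ⟨_, rfl, by simp [hs], by simp [hc]⟩
    · exact Or.inl rfl
  · exact Or.inl rfl

lemma tgtStep_good (child : List Int) (q : Int × Int)
    (st : List (Int × String) × PySem.Set Int) (a : Int)
    (h1 : (st.1.map Prod.fst).Nodup)
    (h2 : ∀ t, t ∈ st.1.map Prod.fst → PySem.Set.contains st.2 t = true) :
    ((tgtStep child q st a).1.map Prod.fst).Nodup ∧
      (∀ t, t ∈ (tgtStep child q st a).1.map Prod.fst →
        PySem.Set.contains (tgtStep child q st a).2 t = true) := by
  rcases tgtStep_fst_cases child q st a with hcase | ⟨s, hcase, hseen, hchild⟩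
  · refine ⟨by rw [hcase]; exact h1, ?_⟩
    intro t ht
    rw [hcase] at ht
    rw [tgtStep_contains, h2 t ht]
    rfl
  · have ha : a ∉ st.1.map Prod.fst := fun hx => by rw [h2 a hx] at hseen; cases hseen
    constructor
    · rw [hcase, List.map_append]
      simp only [List.map_cons, List.map_nil]
      exact List.nodup_append.2 ⟨h1, List.nodup_singleton _, by
        intro x hx y hy
        rw [List.mem_singleton] at hy
        subst hy
        exact fun e => ha (e ▸ hx)⟩
    · intro t ht
      rw [tgtStep_contains]
      rw [hcase, List.map_append] at ht
      rcases List.mem_append.1 ht with h | h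
      · rw [h2 t h]; rfl
      · simp only [List.map_cons, List.map_nil, List.mem_singleton] at h
        subst h
        rw [hchild]
        simp

lemma foldl_good (child : List Int) (q : Int × Int) : ∀ (L : List Int)
    (st : List (Int × String) × PySem.Set Int),
    (st.1.map Prod.fst).Nodup →
    (∀ t, t ∈ st.1.map Prod.fst → PySem.Set.contains st.2 t = true) →
    (((L.foldl (tgtStep child q) st).1.map Prod.fst).Nodup ∧
      (∀ t, t ∈ (L.foldl (tgtStep child q) st).1.map Prod.fst →
        PySem.Set.contains (L.foldl (tgtStep child q) st).2 t = true)) := by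
  intro L
  induction L with
  | nil => intro st h1 h2; exact ⟨h1, h2⟩
  | cons a L ih =>
    intro st h1 h2
    have := tgtStep_good child q st a h1 h2
    exact ih _ this.1 this.2

lemma pair_mem (child : List Int) (p : Int × Int) (st : List (Int × String) × PySem.Set Int)
    (t : Int) (s : String) :
    ((t, s) ∈ ((tval p).foldl (tgtStep child p) st).1 ↔
      ((t, s) ∈ st.1 ∨ (PySem.Set.contains child t = true ∧ PySem.Set.contains st.2 t = false ∧
        (if t = p.1 + p.2 then some (annotSum p.1 p.2 t)
         else if t = |p.1 - p.2| then some (annotDiff p.1 p.2 t)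
         else none) = some s))) := by
  rcases lt_trichotomy (|p.1 - p.2|) (p.1 + p.2) with hlt | hba | hgt
  · -- tval p = [|p.1 - p.2|, p.1 + p.2]
    have hba : ¬ (|p.1 - p.2| = p.1 + p.2) := ne_of_lt hlt
    rw [tval_cases, if_neg hba, if_pos hlt]
    have e1 : List.foldl (tgtStep child p) st [|p.1 - p.2|, p.1 + p.2]
        = tgtStep child p (tgtStep child p st |p.1 - p.2|) (p.1 + p.2) := rfl
    have hd : decide ((p.1 + p.2) = |p.1 - p.2|) = false :=
      decide_eq_false (fun e => hba e.symm)
    rw [e1, tgtStep_mem, tgtStep_mem, tgtStep_contains, hd]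
    simp only [Bool.false_and, Bool.or_false]
    by_cases ht1 : t = p.1 + p.2
    · subst ht1
      rw [if_pos rfl]
      constructor
      · rintro ((h | ⟨hte, _⟩) | ⟨_, hc, hs2, hann⟩)
        · exact Or.inl h
        · exact absurd hte (fun e => hba e.symm)
        · rcases hann with ⟨_, rfl⟩ | ⟨hne, _, _⟩
          · exact Or.inr ⟨hc, hs2, rfl⟩
          · exact absurd (by trivial) hne
      · rintro (h | ⟨hc, hs2, h⟩)
        · exact Or.inl (Or.inl h)
        · injection h with h
          exact Or.inr ⟨by trivial, hc, hs2, Or.inl ⟨by trivial, h.symm⟩⟩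
    · by_cases ht2 : t = |p.1 - p.2|
      · subst ht2
        rw [if_neg ht1, if_pos rfl]
        constructor
        · rintro ((h | ⟨_, hc, hs2, hann⟩) | ⟨hte, _⟩)
          · exact Or.inl h
          · rcases hann with ⟨he, _⟩ | ⟨_, _, rfl⟩
            · exact absurd he hba
            · exact Or.inr ⟨hc, hs2, rfl⟩
          · exact absurd hte ht1
        · rintro (h | ⟨hc, hs2, h⟩)
          · exact Or.inl (Or.inl h)
          · injection h with h
            exact Or.inl (Or.inr ⟨by trivial, hc, hs2, Or.inr ⟨hba, by trivial, h.symm⟩⟩)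
      · rw [if_neg ht1, if_neg ht2]
        constructor
        · rintro ((h | ⟨hte, _⟩) | ⟨hte, _⟩)
          · exact Or.inl h
          · exact absurd hte ht2
          · exact absurd hte ht1
        · rintro (h | ⟨_, _, h⟩)
          · exact Or.inl (Or.inl h)
          · cases h
  · -- tval p = [p.1 + p.2]
    rw [tval_cases, if_pos hba]
    have e1 : List.foldl (tgtStep child p) st [p.1 + p.2] = tgtStep child p st (p.1 + p.2) := rfl
    rw [e1, tgtStep_mem]
    by_cases ht : t = p.1 + p.2
    · subst ht
      rw [if_pos rfl]
      constructor
      · rintro (h | ⟨_, hc, hs2, hann⟩)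
        · exact Or.inl h
        · rcases hann with ⟨_, rfl⟩ | ⟨hne, _, _⟩
          · exact Or.inr ⟨hc, hs2, rfl⟩
          · exact absurd (by trivial) hne
      · rintro (h | ⟨hc, hs2, h⟩)
        · exact Or.inl h
        · injection h with h
          exact Or.inr ⟨by trivial, hc, hs2, Or.inl ⟨by trivial, h.symm⟩⟩
    · have ht2 : ¬ t = |p.1 - p.2| := by rw [hba]; exact ht
      rw [if_neg ht, if_neg ht2]
      constructor
      · rintro (h | ⟨hte, _⟩)
        · exact Or.inl h
        · exact absurd hte ht
      · rintro (h | ⟨_, _, h⟩)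
        · exact Or.inl h
        · cases h
  · -- tval p = [p.1 + p.2, |p.1 - p.2|]
    have hba : ¬ (|p.1 - p.2| = p.1 + p.2) := ne_of_gt hgt
    have hlt : ¬ (|p.1 - p.2| < p.1 + p.2) := not_lt.2 (le_of_lt hgt)
    rw [tval_cases, if_neg hba, if_neg hlt]
    have e1 : List.foldl (tgtStep child p) st [p.1 + p.2, |p.1 - p.2|]
        = tgtStep child p (tgtStep child p st (p.1 + p.2)) |p.1 - p.2| := rfl
    have hd : decide (|p.1 - p.2| = p.1 + p.2) = false := decide_eq_false hba
    rw [e1, tgtStep_mem, tgtStep_mem, tgtStep_contains, hd]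
    simp only [Bool.false_and, Bool.or_false]
    by_cases ht1 : t = p.1 + p.2
    · subst ht1
      rw [if_pos rfl]
      constructor
      · rintro ((h | ⟨_, hc, hs2, hann⟩) | ⟨hte, _⟩)
        · exact Or.inl h
        · rcases hann with ⟨_, rfl⟩ | ⟨hne, _, _⟩
          · exact Or.inr ⟨hc, hs2, rfl⟩
          · exact absurd (by trivial) hne
        · exact absurd hte (fun e => hba e.symm)
      · rintro (h | ⟨hc, hs2, h⟩)
        · exact Or.inl (Or.inl h)
        · injection h with h
          exact Or.inl (Or.inr ⟨by trivial, hc, hs2, Or.inl ⟨by trivial, h.symm⟩⟩)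
    · by_cases ht2 : t = |p.1 - p.2|
      · subst ht2
        rw [if_neg ht1, if_pos rfl]
        constructor
        · rintro ((h | ⟨hte, _⟩) | ⟨_, hc, hs2, hann⟩)
          · exact Or.inl h
          · exact absurd hte ht1
          · rcases hann with ⟨he, _⟩ | ⟨_, _, rfl⟩
            · exact absurd he hba
            · exact Or.inr ⟨hc, hs2, rfl⟩
        · rintro (h | ⟨hc, hs2, h⟩)
          · exact Or.inl (Or.inl h)
          · injection h with h
            exact Or.inr ⟨by trivial, hc, hs2, Or.inr ⟨hba, by trivial, h.symm⟩⟩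
      · rw [if_neg ht1, if_neg ht2]
        constructor
        · rintro ((h | ⟨hte, _⟩) | ⟨hte, _⟩)
          · exact Or.inl h
          · exact absurd hte ht1
          · exact absurd hte ht2
        · rintro (h | ⟨_, _, h⟩)
          · exact Or.inl (Or.inl h)
          · cases h

lemma pair_contains (child : List Int) (p : Int × Int)
    (st : List (Int × String) × PySem.Set Int) (t : Int) :
    PySem.Set.contains (((tval p).foldl (tgtStep child p) st)).2 t =
      (PySem.Set.contains st.2 t || (predB t p && PySem.Set.contains child t)) := by
  rcases lt_trichotomy (|p.1 - p.2|) (p.1 + p.2) with hlt | hba | hgt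
  · have hba : ¬ (|p.1 - p.2| = p.1 + p.2) := ne_of_lt hlt
    rw [tval_cases, if_neg hba, if_pos hlt]
    have e1 : List.foldl (tgtStep child p) st [|p.1 - p.2|, p.1 + p.2]
        = tgtStep child p (tgtStep child p st |p.1 - p.2|) (p.1 + p.2) := rfl
    rw [e1, tgtStep_contains, tgtStep_contains]
    by_cases ht1 : t = p.1 + p.2
    · subst ht1
      simp [predB, decide_eq_false hba, decide_eq_false (fun e => hba (Eq.symm e)), Bool.or_assoc]
    · by_cases ht2 : t = |p.1 - p.2| <;> simp [predB, ht1, ht2, decide_eq_false hba, decide_eq_false (fun e => hba (Eq.symm e)), Bool.or_assoc]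
  · rw [tval_cases, if_pos hba]
    have e1 : List.foldl (tgtStep child p) st [p.1 + p.2] = tgtStep child p st (p.1 + p.2) := rfl
    rw [e1, tgtStep_contains]
    by_cases ht : t = p.1 + p.2
    · subst ht; simp [predB, hba]
    · have ht2 : ¬ t = |p.1 - p.2| := by rw [hba]; exact ht
      simp [predB, ht, ht2]
  · have hba : ¬ (|p.1 - p.2| = p.1 + p.2) := ne_of_gt hgt
    have hlt : ¬ (|p.1 - p.2| < p.1 + p.2) := not_lt.2 (le_of_lt hgt)
    rw [tval_cases, if_neg hba, if_neg hlt]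
    have e1 : List.foldl (tgtStep child p) st [p.1 + p.2, |p.1 - p.2|]
        = tgtStep child p (tgtStep child p st (p.1 + p.2)) |p.1 - p.2| := rfl
    rw [e1, tgtStep_contains, tgtStep_contains]
    by_cases ht1 : t = p.1 + p.2
    · subst ht1
      simp [predB, decide_eq_false hba, decide_eq_false (fun e => hba (Eq.symm e)), Bool.or_assoc]
    · by_cases ht2 : t = |p.1 - p.2| <;> simp [predB, ht1, ht2, decide_eq_false hba, decide_eq_false (fun e => hba (Eq.symm e)), Bool.or_assoc]

lemma runA_spec (child : List Int) (Q : List (Int × Int)) :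
    (∀ t s, ((t, s) ∈ (runA child Q).1 ↔
        (PySem.Set.contains child t = true ∧ firstAnnot t Q = some s)))
    ∧ (∀ t, PySem.Set.contains (runA child Q).2 t =
        (PySem.Set.contains child t && (firstAnnot t Q).isSome))
    ∧ ((runA child Q).1.map Prod.fst).Nodup := by
  induction Q using List.reverseRecOn with
  | nil =>
    refine ⟨?_, ?_, ?_⟩
    · intro t s; simp [runA, firstAnnot]
    · intro t; simp [runA, firstAnnot, PySem.Set.empty, PySem.Set.contains]
    · simp [runA]
  | append_singleton Q p ih =>
    obtain ⟨ih1, ih2, ih3⟩ := ih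
    have hst : runA child (Q ++ [p]) = (tval p).foldl (tgtStep child p) (runA child Q) := by
      simp [runA, List.map_append, List.foldl_append, AStep]
    have hone : ∀ t, firstAnnot t [p] =
        (if t = p.1 + p.2 then some (annotSum p.1 p.2 t)
         else if t = |p.1 - p.2| then some (annotDiff p.1 p.2 t) else none) := by
      intro t; obtain ⟨m, n⟩ := p; rfl
    have hinv : ∀ t, t ∈ (runA child Q).1.map Prod.fst →
        PySem.Set.contains (runA child Q).2 t = true := by
      intro t ht
      obtain ⟨x, hmem, heq⟩ := List.mem_map.1 ht
      obtain ⟨t1, s⟩ := x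
      cases heq
      rcases (ih1 t1 s).1 hmem with ⟨hc, hf⟩
      rw [ih2 t1, hf]
      simp only [Option.isSome_some, Bool.and_true]
      exact hc
    refine ⟨?_, ?_, ?_⟩
    · intro t s
      rw [hst, pair_mem, ih1 t s, ih2 t, firstAnnot_append, hone t]
      cases hQ : firstAnnot t Q with
      | some s0 =>
        cases hc : PySem.Set.contains child t <;> simp [Option.some_or]
      | none =>
        cases hc : PySem.Set.contains child t <;> simp [Option.none_or]
    · intro t
      rw [hst, pair_contains, ih2 t, firstAnnot_append, Option.isSome_or, hone t]
      have hchain : (if t = p.1 + p.2 then some (annotSum p.1 p.2 t)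
          else if t = |p.1 - p.2| then some (annotDiff p.1 p.2 t) else none).isSome
          = predB t p := by
        simp only [predB]; split_ifs with h1 h2 <;> simp_all
      rw [hchain]
      cases hc : PySem.Set.contains child t <;>
        cases hq : (firstAnnot t Q).isSome <;>
        cases hp : predB t p <;> simp
    · rw [hst]
      exact (foldl_good child p (tval p) (runA child Q) ih3 hinv).1

lemma foldl_match (P : List (Int × Int)) (l : List Int) : ∀ acc : List (Int × String),
    l.foldl (fun out tgt => match firstAnnot tgt P with
      | some s => out ++ [(tgt, s)]
      | none => out) acc
    = acc ++ l.filterMap (fun t => (firstAnnot t P).map (fun s => (t, s))) := by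
  induction l with
  | nil => simp
  | cons x l ih =>
    intro acc
    cases hx : firstAnnot x P <;> simp [List.foldl_cons, hx, ih]

lemma sorted_items_eq (l : List (Int × Int)) (hl : l.Nodup) :
    PySem.List.sorted (l.map (fun p => (p, tval p)))
      (fun it => (toLex (it.1.1, it.1.2) : Lex (Int × Int))) false
    = (PySem.List.sorted l lexKey false).map (fun p => (p, tval p)) := by
  apply PySem.List.sorted_eq_of_perm_of_pairwise_lt
  · exact (PySem.List.sorted_perm l lexKey false).map _
  · rw [List.pairwise_map]
    have hle := PySem.List.sorted_pairwise l lexKey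
    have hnd : (PySem.List.sorted l lexKey false).Nodup :=
      ((PySem.List.sorted_perm l lexKey false).nodup_iff).mpr hl
    refine (hle.and hnd).imp ?_
    rintro a b ⟨hab, hne⟩
    simp only [Prod.mk.eta]
    exact lt_of_le_of_ne hab (fun e => hne (toLex.injective e))

lemma dict_fold (l : List (Int × Int)) :
    (l.foldl (fun d p => d.insert p (tval p)) PySem.Dict.empty).items
      = (PySem.Set.ofList l).map (fun p => (p, tval p)) := by
  induction l using List.reverseRecOn with
  | nil => rfl
  | append_singleton l p ih =>
    rw [List.foldl_append, List.foldl_cons, List.foldl_nil]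
    have hof : PySem.Set.ofList (l ++ [p]) = (PySem.Set.ofList l).add p := by
      rw [PySem.Set.ofList, PySem.Set.ofList, List.foldl_append]
      rfl
    have hkeys : (l.foldl (fun d p => d.insert p (tval p)) PySem.Dict.empty).keys
        = PySem.Set.ofList l := by
      simp only [PySem.Dict.keys, ih, List.map_map]
      exact List.map_id _
    by_cases hp : p ∈ PySem.Set.ofList l
    · have hcont : (l.foldl (fun d p => d.insert p (tval p)) PySem.Dict.empty).contains p
          = true := (PySem.Dict.contains_iff_mem_keys _ _).2 (hkeys ▸ hp)
      have hadd : (PySem.Set.ofList l).add p = PySem.Set.ofList l := by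
        unfold PySem.Set.add
        rw [if_pos ((PySem.Set.contains_iff _ _).2 hp)]
      rw [hof, hadd]
      show (PySem.Dict.insert _ p (tval p)).items = _
      rw [PySem.Dict.insert, if_pos hcont]
      simp only [ih, List.map_map]
      apply List.map_congr_left
      intro r _
      by_cases hr : r = p <;> simp [hr]
    · have hcont : (l.foldl (fun d p => d.insert p (tval p)) PySem.Dict.empty).contains p
          = false := by
        rw [Bool.eq_false_iff]
        intro hb
        exact hp (hkeys ▸ (PySem.Dict.contains_iff_mem_keys _ _).1 hb)
      rw [hof]
      show (PySem.Dict.insert _ p (tval p)).items = _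
      rw [PySem.Dict.insert, if_neg (by simp [hcont])]
      have hadd : (PySem.Set.ofList l).add p = PySem.Set.ofList l ++ [p] := by
        unfold PySem.Set.add
        rw [if_neg]
        intro hb
        exact hp ((PySem.Set.contains_iff _ _).1 hb)
      rw [hadd, List.map_append, ih]
      rfl

lemma enum_filter_map_snd (xs : List Int) : ∀ (s0 : Int) (k : Nat),
    (((PySem.List.enumerate xs s0).filter (fun jn => decide (s0 + (k : Int) < jn.1))).map
      (fun jn => jn.2)) = xs.drop (k + 1) := by
  induction xs with
  | nil => intro s0 k; simp [PySem.List.enumerate_nil]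
  | cons x xs ih =>
    intro s0 k
    rw [PySem.List.enumerate_cons, List.filter_cons]
    have h0 : ¬ (s0 + (k : Int) < (s0, x).1) := by
      simp only
      have : (0 : Int) ≤ (k : Int) := Int.natCast_nonneg k
      omega
    rw [if_neg (by simpa using h0)]
    cases k with
    | zero =>
      simp only [Nat.cast_zero, add_zero]
      rw [List.filter_eq_self.mpr, PySem.List.map_snd_enumerate]
      · rfl
      · intro jn hjn
        rcases (PySem.List.mem_enumerate_iff xs (s0 + 1) jn).1 hjn with ⟨k', hk', rfl⟩
        simp only [decide_eq_true_eq]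
        have : (0 : Int) ≤ (k' : Int) := Int.natCast_nonneg k'
        omega
    | succ k' =>
      have hcast : ∀ jn : Int × Int, (s0 + ((k' + 1 : Nat) : Int) < jn.1)
          = ((s0 + 1) + (k' : Int) < jn.1) := by
        intro jn; congr 1; push_cast; ring
      simp only [hcast]
      rw [ih (s0 + 1) k']
      rfl

lemma pt_eq (s : List Int) :
    pairwise_targets s = (raw s).foldl (fun d p => d.insert p (tval p)) PySem.Dict.empty := by
  unfold pairwise_targets raw
  rw [List.foldl_flatMap]
  apply PySem.List.foldl_congr_mem
  intro d im him
  obtain ⟨k, hk, heq⟩ := (PySem.List.mem_enumerate_iff s 0 im).1 him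
  subst heq
  simp only [zero_add]
  rw [List.foldl_map]
  have hslice : PySem.List.slice s (some ((k : Int) + 1)) none = s.drop (k + 1) := by
    have hc : ((k : Int) + 1) = ((k + 1 : Nat) : Int) := by push_cast; ring
    rw [hc, PySem.List.slice_from_natCast]
  rw [hslice]
  have hef := enum_filter_map_snd s 0 k
  simp only [zero_add] at hef
  rw [← hef, List.foldl_map, List.foldl_filter]
  apply PySem.List.foldl_congr_mem
  intro d' jn _
  by_cases h : jn.1 ≤ (k : Int)
  · rw [if_pos h, if_neg (by simp; omega)]
  · rw [if_neg h, if_pos (by simp; omega)]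
    simp [tval]

lemma A_unfold (s c : List Int) :
    triad_annotations s c =
      PySem.List.sorted (runA c (PySem.List.sorted (PySem.Set.ofList (raw s)) lexKey false)).1
        (fun x => x.1) false := by
  have h0 : triad_annotations s c =
      PySem.List.sorted ((PySem.List.sorted (pairwise_targets s).items
        (fun it => (toLex (it.1.1, it.1.2) : Lex (Int × Int))) false).foldl
        (AStep c) ([], PySem.Set.empty)).1 (fun x => x.1) false := rfl
  rw [h0, pt_eq]
  rw [dict_fold]
  rw [sorted_items_eq _ (PySem.Set.nodup_ofList _)]
  rfl

lemma B_unfold (s c : List Int) :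
    triad_annotations_alt s c =
      (PySem.List.sorted c (fun t => t) false).filterMap
        (fun t => (firstAnnot t (PySem.List.sorted (raw s) lexKey false)).map
          (fun str => (t, str))) := by
  have h0 : triad_annotations_alt s c =
      (PySem.List.sorted c (fun t => t) false).foldl
        (fun out tgt => match firstAnnot tgt (PySem.List.sorted (raw s) lexKey false) with
          | some str => out ++ [(tgt, str)]
          | none => out) [] := rfl
  rw [h0, foldl_match]
  simp

-- ===== VERDICT (by name: the statement is the Claim_ definition above) =====
theorem triad_annotations_spec : Claim_equal_triad_annotations := by
  intro seeded child_set _ hpre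
  unfold Spec_triad_annotations
  have hnd : child_set.Nodup := hpre
  rw [A_unfold, B_unfold]
  have hmemiff : ∀ p : Int × Int,
      p ∈ PySem.List.sorted (PySem.Set.ofList (raw seeded)) lexKey false ↔
      p ∈ PySem.List.sorted (raw seeded) lexKey false := by
    intro p
    rw [PySem.List.mem_sorted, PySem.List.mem_sorted, PySem.Set.mem_ofList]
  have hFA : ∀ t, firstAnnot t (PySem.List.sorted (PySem.Set.ofList (raw seeded)) lexKey false)
      = firstAnnot t (PySem.List.sorted (raw seeded) lexKey false) := by
    intro t
    rw [firstAnnot_eq_find?, firstAnnot_eq_find?,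
      find?_eq_of_sorted _ _ (predB t) hmemiff
        (PySem.List.sorted_pairwise _ lexKey) (PySem.List.sorted_pairwise _ lexKey)]
  obtain ⟨hi, hii, hiii⟩ := runA_spec child_set
    (PySem.List.sorted (PySem.Set.ofList (raw seeded)) lexKey false)
  have hchlt : (PySem.List.sorted child_set (fun t => t) false).Pairwise (· < ·) := by
    have h1 := PySem.List.sorted_pairwise child_set (fun t => t)
    have h2 : (PySem.List.sorted child_set (fun t => t) false).Nodup :=
      ((PySem.List.sorted_perm child_set (fun t => t) false).nodup_iff).mpr hnd
    exact (h1.and h2).imp (fun hx => lt_of_le_of_ne hx.1 hx.2)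
  have hBlt : ((PySem.List.sorted child_set (fun t => t) false).filterMap
      (fun t => (firstAnnot t (PySem.List.sorted (raw seeded) lexKey false)).map
        (fun str => (t, str)))).Pairwise (fun x y => x.1 < y.1) := by
    rw [List.pairwise_filterMap]
    refine hchlt.imp ?_
    intro a b hab x hx y hy
    have hxa : x.1 = a := by
      cases hfa : firstAnnot a (PySem.List.sorted (raw seeded) lexKey false) <;> rw [hfa] at hx
      · cases hx
      · cases hx; rfl
    have hyb : y.1 = b := by
      cases hfb : firstAnnot b (PySem.List.sorted (raw seeded) lexKey false) <;> rw [hfb] at hy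
      · cases hy
      · cases hy; rfl
    rw [hxa, hyb]
    exact hab
  have hndB : ((PySem.List.sorted child_set (fun t => t) false).filterMap
      (fun t => (firstAnnot t (PySem.List.sorted (raw seeded) lexKey false)).map
        (fun str => (t, str)))).Nodup :=
    hBlt.imp (fun {x y} h => fun e => absurd (e ▸ h) (lt_irrefl _))
  have hperm : ((PySem.List.sorted child_set (fun t => t) false).filterMap
      (fun t => (firstAnnot t (PySem.List.sorted (raw seeded) lexKey false)).map
        (fun str => (t, str)))).Perm
      (runA child_set (PySem.List.sorted (PySem.Set.ofList (raw seeded)) lexKey false)).1 := by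
    rw [List.perm_ext_iff_of_nodup hndB (List.Nodup.of_map Prod.fst hiii)]
    rintro ⟨t, s⟩
    rw [List.mem_filterMap, hi t s]
    constructor
    · rintro ⟨t', ht', hmap⟩
      cases hfa : firstAnnot t' (PySem.List.sorted (raw seeded) lexKey false) <;>
        rw [hfa] at hmap
      · cases hmap
      · cases hmap
        refine ⟨(PySem.Set.contains_iff _ _).2 ((PySem.List.mem_sorted _ _ _ _).1 ht'), ?_⟩
        rw [hFA]
        exact hfa
    · rintro ⟨hc, hf⟩
      refine ⟨t, (PySem.List.mem_sorted _ _ _ _).2 ((PySem.Set.contains_iff _ _).1 hc), ?_⟩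
      rw [hFA t] at hf
      rw [hf]
      rfl
  exact PySem.List.sorted_eq_of_perm_of_pairwise_lt _ _ (fun x => x.1) hperm hBlt
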